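-- pv_equiv track=rewrite | github.com/Atieno-Ouma/SNEAK100 | src/rsa_encrypt.py | makePackets
-- ===== SOURCE A (Python) =====
-- letter = {"A":11,"B":12,"C":13,"D":14,"E":15,"F":16,"G":17,"H":18,"I":19,"J":20,"K":21,"L":22,"M":23,"N":24,"O":25,"P":26,"Q":27,
--           "R":28,"S":29,"T":30,"U":31,"V":32,"W":33,"X":34,"Y":35,"Z":36,",":37,".":38,"!":39,"?":40," ":41}
--
-- def makePackets(message,N):
--     message = message.upper()
--     # length of chars in each packet.
--     pktChars = (N-1)//2
--     # size is number of packets.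
--     paddingSize = pktChars - (len(message)%pktChars)
--     for i in range(0,paddingSize):
--         message += " "
--
--     packets = []
--     temp = 0
--     for i in range(0,len(message)):
--         if(i%pktChars==0 and i!=0):
--             packets.append(temp)
--             temp=0
--         temp = temp*100 + int(letter[message[i]])
--     if(temp!=0):
--         packets.append(temp)
--     return packets
-- ===== SOURCE B (Python) =====
-- letter = {"A":11,"B":12,"C":13,"D":14,"E":15,"F":16,"G":17,"H":18,"I":19,"J":20,"K":21,"L":22,"M":23,"N":24,"O":25,"P":26,"Q":27,
--           "R":28,"S":29,"T":30,"U":31,"V":32,"W":33,"X":34,"Y":35,"Z":36,",":37,".":38,"!":39,"?":40," ":41}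
--
-- def _packNum(chunk):
--     v = 0
--     for c in chunk:
--         v = v * 100 + letter[c]
--     return v
--
-- def makePackets(message, N):
--     msg = message.upper()
--     pktChars = (N - 1) // 2
--     msg += " " * (pktChars - len(msg) % pktChars)
--     return [_packNum(msg[i:i + pktChars]) for i in range(0, len(msg), pktChars)]
-- ===== Notes on version B (the rewrite author's own statement) =====
-- stated objective: simpler
-- what changed: Replaces A's single flat loop with a running modulo boundary-check, flush-to-packets accumulator and trailing non-zero flush by slicing the padded message into pktChars-sized chunks and folding each chunk independently into its number.
-- outside the precondition, e.g. on makePackets('AB', 0): A returns [11, 12], B returns []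
import Mathlib
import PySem

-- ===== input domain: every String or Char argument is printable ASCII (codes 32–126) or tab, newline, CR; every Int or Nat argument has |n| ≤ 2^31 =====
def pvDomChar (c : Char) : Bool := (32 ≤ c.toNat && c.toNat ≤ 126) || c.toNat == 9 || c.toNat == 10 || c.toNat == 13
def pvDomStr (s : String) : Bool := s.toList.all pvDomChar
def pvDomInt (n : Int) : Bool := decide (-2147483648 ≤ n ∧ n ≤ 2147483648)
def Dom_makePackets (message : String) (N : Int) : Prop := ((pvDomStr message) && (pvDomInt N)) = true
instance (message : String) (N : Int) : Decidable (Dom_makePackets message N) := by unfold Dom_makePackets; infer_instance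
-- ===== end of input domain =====

-- B slices the padded message into pktChars-sized chunks and folds each chunk into its number,
-- instead of A's flat indexed loop with a modulo boundary check and a trailing flush (objective: simpler).

-- ===== PORT A =====
-- the module-level dict 'letter' as an association list
def letterPairs : List (Char × Int) :=
  [('A',11),('B',12),('C',13),('D',14),('E',15),('F',16),('G',17),('H',18),('I',19),('J',20),
   ('K',21),('L',22),('M',23),('N',24),('O',25),('P',26),('Q',27),('R',28),('S',29),('T',30),
   ('U',31),('V',32),('W',33),('X',34),('Y',35),('Z',36),(',',37),('.',38),('!',39),('?',40),(' ',41)]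

-- letter[c]; a missing key is a KeyError in Python, excluded by Pre_ (default 0 is never reached there)
def letterVal (c : Char) : Int := (letterPairs.lookup c).getD 0

-- for i in range(0, paddingSize): message += " "
def padLoop (msg : List Char) (paddingSize : Int) : List Char :=
  (PySem.List.pyRange 0 paddingSize 1).foldl (fun m _ => m ++ [' ']) msg

-- the main 'for i in range(0, len(message))' loop, carrying (packets, temp) and the index i;
-- the branch flushes temp to packets and resets it before the accumulation step, as in A
def aLoop (pktChars : Int) : List Char → Int → List Int → Int → (List Int × Int)
  | [], _, packets, temp => (packets, temp)
  | c :: rest, i, packets, temp =>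
    if PySem.Int.mod i pktChars = 0 ∧ i ≠ 0 then
      aLoop pktChars rest (i + 1) (packets ++ [temp]) (0 * 100 + letterVal c)
    else
      aLoop pktChars rest (i + 1) packets (temp * 100 + letterVal c)

def makePackets (message : String) (N : Int) : List Int :=
  let msg := PySem.Chars.upper message.toList
  let pktChars := PySem.Int.floordiv (N - 1) 2
  -- Python raises ZeroDivisionError here when pktChars = 0 (N ∈ {1,2}); excluded by Pre_
  let paddingSize := pktChars - PySem.Int.mod (msg.length : Int) pktChars
  let msg := padLoop msg paddingSize
  let pr := aLoop pktChars msg 0 [] 0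
  if pr.2 ≠ 0 then pr.1 ++ [pr.2] else pr.1

-- ===== PORT B =====
-- _packNum: fold one chunk's letter values into a single integer
def packNum (chunk : List Char) : Int := chunk.foldl (fun v c => v * 100 + letterVal c) 0

def makePackets_alt (message : String) (N : Int) : List Int :=
  let msg := PySem.Chars.upper message.toList
  let pktChars := PySem.Int.floordiv (N - 1) 2
  -- msg += " " * (pktChars - len(msg) % pktChars)   (" " * n is empty for n ≤ 0, as .toNat clamps)
  let msg := msg ++ List.replicate (pktChars - PySem.Int.mod (msg.length : Int) pktChars).toNat ' '
  (PySem.List.pyRange 0 (msg.length : Int) pktChars).map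
    (fun i => packNum (PySem.List.slice msg (some i) (some (i + pktChars))))

-- ===== PRECONDITION & SPEC =====
def validChars : List Char :=
  ['A','B','C','D','E','F','G','H','I','J','K','L','M','N','O','P','Q','R','S','T','U','V','W',
   'X','Y','Z',',','.','!','?',' ']

-- Pre_ restricts to the natural domain: N ≥ 3 (so the packet size (N-1)//2 is positive; N ∈ {1,2}
-- is a ZeroDivisionError, and for N ≤ 0 the packet size is a nonsensical negative on which A's
-- per-|pktChars| output is a degenerate accident), and every uppercased character is a key of
-- 'letter' (otherwise Python raises KeyError).
def Pre_makePackets (message : String) (N : Int) : Prop :=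
  3 ≤ N ∧ message.toList.all (fun c => validChars.contains (PySem.Chars.upperChar c)) = true
instance (message : String) (N : Int) : Decidable (Pre_makePackets message N) := by
  unfold Pre_makePackets; infer_instance

def pvWitness_makePackets : String × Int := ("HI", 5)

def Spec_makePackets (message : String) (N : Int) (out : List Int) : Prop := out = makePackets_alt message N
instance (message : String) (N : Int) (out : List Int) : Decidable (Spec_makePackets message N out) := by
  unfold Spec_makePackets; infer_instance

-- ===== CLAIM (what is proved, stated in full; the proofs are below) =====
def Claim_equal_makePackets : Prop := ∀ (message : String) (N : Int), Dom_makePackets message N → Pre_makePackets message N → Spec_makePackets message N (makePackets message N)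

-- ===== LEMMAS AND PROOFS =====

-- the chunked description both programs are reduced to
def chunkPacks (K : Nat) : Nat → List Char → List Int
  | 0, _ => []
  | m + 1, cs => packNum (cs.take K) :: chunkPacks K m (cs.drop K)

theorem padLoop_eq (msg : List Char) (n : Int) :
    padLoop msg n = msg ++ List.replicate n.toNat ' ' := by
  unfold padLoop
  rw [PySem.List.foldl_append_singleton_eq_map (f := fun _ => ' ')]
  simp [PySem.List.pyRange_one, Function.comp_def, List.map_const', List.length_range]

theorem packNum_pos_aux (cs : List Char) (v : Int) (hv : 1 ≤ v)
    (h : ∀ c ∈ cs, 1 ≤ letterVal c) : 1 ≤ cs.foldl (fun v c => v * 100 + letterVal c) v := by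
  induction cs generalizing v with
  | nil => exact hv
  | cons c cs ih =>
    refine ih _ ?_ (fun d hd => h d (List.mem_cons_of_mem _ hd))
    have h1 := h c (List.mem_cons_self)
    nlinarith

theorem packNum_pos (cs : List Char) (hne : cs ≠ [])
    (h : ∀ c ∈ cs, 1 ≤ letterVal c) : packNum cs ≠ 0 := by
  cases cs with
  | nil => exact absurd rfl hne
  | cons c cs =>
    have : 1 ≤ packNum (c :: cs) := by
      refine packNum_pos_aux cs (0 * 100 + letterVal c) ?_ (fun d hd => h d (List.mem_cons_of_mem _ hd))
      have := h c (List.mem_cons_self); linarith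
    omega

theorem aLoop_noflush (K : Nat) (cs rest : List Char) (j : Nat) (p : List Int) (temp : Int)
    (h : ∀ d < cs.length, (j + d) % K ≠ 0) :
    aLoop (K : Int) (cs ++ rest) (j : Int) p temp =
      aLoop (K : Int) rest ((j + cs.length : Nat) : Int) p
        (cs.foldl (fun v c => v * 100 + letterVal c) temp) := by
  induction cs generalizing j temp with
  | nil => simp
  | cons c cs ih =>
    show aLoop (K : Int) (c :: (cs ++ rest)) (j : Int) p temp = _
    rw [aLoop]
    have hcond : ¬ (PySem.Int.mod (j : Int) (K : Int) = 0 ∧ (j : Int) ≠ 0) := by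
      rw [PySem.Int.mod_natCast]
      rintro ⟨hc, -⟩
      have hjk : j % K = 0 := by exact_mod_cast hc
      exact h 0 (by simp) (by simpa using hjk)
    rw [if_neg hcond]
    have hc1 : ((j : Int) + 1) = ((j + 1 : Nat) : Int) := by push_cast; ring
    rw [hc1, ih (j + 1) _ (fun d hd => by
      have h2 := h (d + 1) (by simp only [List.length_cons]; omega)
      simpa [show j + 1 + d = j + (d + 1) by omega] using h2)]
    rw [List.foldl_cons, show (j + (c :: cs).length : Nat) = (j + 1 + cs.length : Nat) by
      simp only [List.length_cons]; omega]

theorem aLoop_chunk (K : Nat) (hK : 1 ≤ K) (cs rest : List Char) (t : Nat) (p : List Int)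
    (temp : Int) (hlen : cs.length = K) :
    aLoop (K : Int) (cs ++ rest) ((t * K : Nat) : Int) p temp =
      aLoop (K : Int) rest (((t + 1) * K : Nat) : Int) (if t = 0 then p else p ++ [temp])
        (cs.foldl (fun v c => v * 100 + letterVal c) (if t = 0 then temp else 0)) := by
  cases cs with
  | nil => simp at hlen; omega
  | cons c cs =>
    show aLoop (K : Int) (c :: (cs ++ rest)) _ p temp = _
    rw [aLoop]
    have hmod : PySem.Int.mod ((t * K : Nat) : Int) (K : Int) = 0 := by
      rw [PySem.Int.mod_natCast]; simp [Nat.mul_mod_left]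
    have hcast : ((t * K : Nat) : Int) + 1 = ((t * K + 1 : Nat) : Int) := by push_cast; ring
    have hnf : ∀ d < cs.length, (t * K + 1 + d) % K ≠ 0 := by
      intro d hd
      have hdK : 1 + d < K := by simp at hlen; omega
      have he : (t * K + 1 + d) % K = (1 + d) % K := by
        rw [show t * K + 1 + d = (1 + d) + t * K by ring, Nat.add_mul_mod_self_right]
      rw [he, Nat.mod_eq_of_lt hdK]; omega
    have hidx : (t * K + 1 + cs.length : Nat) = ((t + 1) * K : Nat) := by
      have hcs : cs.length + 1 = K := by simpa using hlen
      rw [add_one_mul]; omega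
    by_cases ht : t = 0
    · subst ht
      rw [if_neg (by simp)]
      rw [hcast, aLoop_noflush K cs rest _ p _ (by simpa using hnf), List.foldl_cons]
      rw [show (0 * K + 1 + cs.length : Nat) = ((0 + 1) * K : Nat) by simpa using hidx]
      simp
    · rw [if_pos ⟨hmod, by
        simp only [ne_eq, Int.natCast_eq_zero]
        positivity⟩]
      simp only [if_neg ht]
      rw [hcast, aLoop_noflush K cs rest _ _ _ hnf, List.foldl_cons, hidx]

def finishA (pr : List Int × Int) : List Int := if pr.2 ≠ 0 then pr.1 ++ [pr.2] else pr.1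

theorem aLoop_main (K : Nat) (hK : 1 ≤ K) :
    ∀ (m : Nat) (cs : List Char) (t : Nat) (p : List Int) (temp : Int),
      cs.length = m * K → 1 ≤ t → temp ≠ 0 → (∀ c ∈ cs, 1 ≤ letterVal c) →
      finishA (aLoop (K : Int) cs ((t * K : Nat) : Int) p temp) = p ++ temp :: chunkPacks K m cs := by
  intro m
  induction m with
  | zero =>
    intro cs t p temp hlen _ htemp _
    have : cs = [] := by simpa using hlen
    subst this
    simp [aLoop, finishA, htemp, chunkPacks]
  | succ m ih =>
    intro cs t p temp hlen ht htemp hval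
    have hsplit : cs = cs.take K ++ cs.drop K := (List.take_append_drop K cs).symm
    have hKle : K ≤ cs.length := by rw [hlen, Nat.succ_mul]; omega
    have hlen1 : (cs.take K).length = K := by rw [List.length_take]; omega
    conv_lhs => rw [hsplit]
    rw [aLoop_chunk K hK _ _ t p temp hlen1, if_neg (by omega)]
    have hne : cs.take K ≠ [] := by
      intro h; rw [h] at hlen1; simp at hlen1; omega
    have hvt : ∀ c ∈ cs.take K, 1 ≤ letterVal c := fun c hc => hval c (List.mem_of_mem_take hc)
    have hpk : packNum (cs.take K) ≠ 0 := packNum_pos _ hne hvt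
    rw [show (cs.take K).foldl (fun v c => v * 100 + letterVal c) (if t = 0 then temp else 0)
          = packNum (cs.take K) by rw [if_neg (by omega)]; rfl]
    rw [ih (cs.drop K) (t + 1) (p ++ [temp]) (packNum (cs.take K))
        (by rw [List.length_drop, hlen, Nat.succ_mul]; omega) (by omega) hpk
        (fun c hc => hval c (List.mem_of_mem_drop hc))]
    simp [chunkPacks]

theorem chunk_map (K : Nat) : ∀ (m : Nat) (cs : List Char),
    (List.range m).map (fun j => packNum ((cs.drop (K * j)).take K)) = chunkPacks K m cs := by
  intro m
  induction m with
  | zero => intro cs; simp [chunkPacks]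
  | succ m ih =>
    intro cs
    rw [List.range_succ_eq_map, List.map_cons, List.map_map]
    simp only [Nat.mul_zero, List.drop_zero, chunkPacks]
    congr 1
    rw [← ih (cs.drop K)]
    apply List.map_congr_left
    intro j _
    simp only [Function.comp_apply, Nat.succ_eq_add_one]
    rw [List.drop_drop]
    congr 2
    rw [Nat.mul_add, Nat.mul_one, Nat.add_comm]

theorem pyRange_chunks (K : Nat) (hK : 1 ≤ K) (m : Nat) (hm : 1 ≤ m) :
    PySem.List.pyRange 0 ((m * K : Nat) : Int) (K : Int) =
      (List.range m).map (fun j => ((K * j : Nat) : Int)) := by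
  have hKpos : (0 : Int) < (K : Int) := by exact_mod_cast hK
  rw [PySem.List.pyRange_of_pos _ _ hKpos]
  have hlt : (0 : Int) < ((m * K : Nat) : Int) := by
    have h1 : 1 ≤ m * K := Nat.one_le_iff_ne_zero.mpr (by positivity)
    exact_mod_cast h1
  rw [if_pos hlt]
  have hq : ((((m * K : Nat) : Int) - 0 + (K : Int) - 1) / (K : Int)).toNat = m := by
    have he : (((m * K : Nat) : Int) - 0 + (K : Int) - 1) = ((K - 1 + m * K : Nat) : Int) := by
      push_cast; omega
    rw [he, ← Int.natCast_div, Nat.add_mul_div_right _ _ (by omega : 0 < K),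
        Nat.div_eq_of_lt (by omega), Int.toNat_natCast]
    omega
  rw [hq]
  apply List.map_congr_left
  intro j _
  push_cast; ring

theorem valid_letterVal : ∀ c ∈ validChars, 1 ≤ letterVal c := by
  intro c hc
  fin_cases hc <;> decide

-- ===== VERDICT (by name: the statement is the Claim_ definition above) =====
theorem makePackets_spec : Claim_equal_makePackets := by
  intro message N _ hPre
  obtain ⟨hN, hchars⟩ := hPre
  have hchars' : ∀ c ∈ message.toList, PySem.Chars.upperChar c ∈ validChars := by
    intro c hc
    simpa using List.all_eq_true.mp hchars c hc
  unfold Spec_makePackets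
  simp only [makePackets, makePackets_alt]
  -- name the shared pieces
  set msg0 := PySem.Chars.upper message.toList with hmsg0
  have hk : PySem.Int.floordiv (N - 1) 2 = (((N - 1) / 2).toNat : Int) := by
    rw [PySem.Int.floordiv_eq_ediv_of_pos (by omega)]
    omega
  set K := ((N - 1) / 2).toNat with hKdef
  have hK : 1 ≤ K := by
    have : (1 : Int) ≤ (N - 1) / 2 := by omega
    omega
  rw [hk]
  set L0 := msg0.length with hL0
  have hmod : PySem.Int.mod (L0 : Int) (K : Int) = ((L0 % K : Nat) : Int) :=
    PySem.Int.mod_natCast L0 K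
  rw [hmod]
  have hr : L0 % K < K := Nat.mod_lt _ (by omega)
  have hpadcast : ((K : Int) - ((L0 % K : Nat) : Int)) = ((K - L0 % K : Nat) : Int) := by
    push_cast; omega
  rw [hpadcast, padLoop_eq, Int.toNat_natCast]
  set pad := K - L0 % K with hpaddef
  set padded := msg0 ++ List.replicate pad ' ' with hpadded
  set m := L0 / K + 1 with hmdef
  have hlenp : padded.length = m * K := by
    rw [hpadded, List.length_append, List.length_replicate, hmdef, add_one_mul, Nat.mul_comm]
    have h1 := Nat.div_add_mod L0 K
    omega
  have hval : ∀ c ∈ padded, 1 ≤ letterVal c := by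
    intro c hc
    rcases List.mem_append.mp hc with h | h
    · rw [hmsg0] at h
      rcases List.mem_map.mp h with ⟨d, hd, rfl⟩
      exact valid_letterVal _ (hchars' d hd)
    · rw [List.eq_of_mem_replicate h]
      exact valid_letterVal ' ' (by decide)
  -- A's side: peel the first chunk, then the main invariant
  have hm1 : ∃ m', m = m' + 1 := ⟨L0 / K, rfl⟩
  obtain ⟨m', hm'⟩ := hm1
  have hsplit : padded = padded.take K ++ padded.drop K := (List.take_append_drop K padded).symm
  have hlen1 : (padded.take K).length = K := by
    rw [List.length_take]
    have : K ≤ padded.length := by rw [hlenp, hm', Nat.succ_mul]; omega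
    omega
  have hA : (if (aLoop (K : Int) padded 0 [] 0).2 ≠ 0 then
        (aLoop (K : Int) padded 0 [] 0).1 ++ [(aLoop (K : Int) padded 0 [] 0).2]
      else (aLoop (K : Int) padded 0 [] 0).1) = chunkPacks K m padded := by
    have step1 := aLoop_chunk K hK (padded.take K) (padded.drop K) 0 [] 0 hlen1
    simp only [Nat.zero_mul, Nat.cast_zero, Nat.zero_add, reduceIte] at step1
    have hpk : packNum (padded.take K) ≠ 0 :=
      packNum_pos _ (by intro h; rw [h] at hlen1; simp at hlen1; omega)
        (fun c hc => hval c (List.mem_of_mem_take hc))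
    have step2 := aLoop_main K hK m' (padded.drop K) 1 [] (packNum (padded.take K))
      (by rw [List.length_drop, hlenp, hm', Nat.succ_mul]; omega) (by omega) hpk
      (fun c hc => hval c (List.mem_of_mem_drop hc))
    simp only [packNum] at step2
    show finishA (aLoop (K : Int) padded 0 [] 0) = chunkPacks K m padded
    conv_lhs => rw [hsplit]
    rw [step1, step2, hm']
    simp [chunkPacks, packNum]
  rw [hA]
  -- B's side
  have hlenpI : ((padded.length : Nat) : Int) = ((m * K : Nat) : Int) := by rw [hlenp]
  rw [hlenpI, pyRange_chunks K hK m (by omega), List.map_map]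
  rw [← chunk_map K m padded]
  apply List.map_congr_left
  intro j _
  simp only [Function.comp_apply]
  have hcast2 : ((K * j : Nat) : Int) + (K : Int) = ((K * j : Nat) : Int) + ((K : Nat) : Int) := rfl
  rw [hcast2, PySem.List.slice_natCast_add]
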